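-- pv_equiv track=rewrite | github.com/yyds-xtt/DRL-Based-Long-Term-Resource-Planning | Environment.py | actioninNN
-- ===== SOURCE A (Python) =====
-- import itertools
--
-- def actioninNN(ac):
--     def Search(alist, item):
--         pos = 0
--         found = False
--         while not found and pos < len(alist):
--             if alist[pos] == item:
--                 found = True
--             else:
--                 pos += 1
--         return pos
--
--     c = list(itertools.product([1, 2], [50, 60, 70, 80, 90, 100, 110, 120, 130, 140]))
--     newc = []
--     for i in c:
--         x = list(i)
--         newc.append(x)
--     index = Search(ac, 1)
--     action = newc[index]
--     return action
-- ===== SOURCE B (Python) =====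
-- def actioninNN(ac):
--     index = 0
--     for v in ac:
--         if v == 1:
--             break
--         index += 1
--     if index >= 20:
--         raise IndexError("list index out of range")
--     return [1 + index // 10, 50 + 10 * (index % 10)]
-- ===== Notes on version B (the rewrite author's own statement) =====
-- stated objective: simpler
-- what changed: B replaces the itertools.product table plus list-indexing with a single scan for the first 1 and a closed-form arithmetic mapping index -> [1 + index//10, 50 + 10*(index%10)], keeping the IndexError for indices beyond the 20-entry action space.
import Mathlib
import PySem

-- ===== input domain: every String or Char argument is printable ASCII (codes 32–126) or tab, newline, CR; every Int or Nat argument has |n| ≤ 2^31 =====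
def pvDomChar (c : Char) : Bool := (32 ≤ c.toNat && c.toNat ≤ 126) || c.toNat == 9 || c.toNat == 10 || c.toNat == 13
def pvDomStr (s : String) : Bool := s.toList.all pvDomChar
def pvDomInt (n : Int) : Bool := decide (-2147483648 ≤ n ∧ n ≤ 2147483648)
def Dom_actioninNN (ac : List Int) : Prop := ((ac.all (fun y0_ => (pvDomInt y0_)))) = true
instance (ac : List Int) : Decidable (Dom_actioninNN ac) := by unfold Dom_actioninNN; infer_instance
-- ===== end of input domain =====

-- B replaces the product-table lookup with a closed-form arithmetic mapping of the first-1 index (objective: simpler); like A it raises IndexError past the 20-entry action space.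

-- ===== PORT A =====
-- the inner Search while-loop: scans the list keeping the running position pos
def pvSearchA (alist : List Int) (item : Int) (pos : Nat) : Nat :=
  match alist with
  | [] => pos
  | x :: rest => if x = item then pos else pvSearchA rest item (pos + 1)

-- c = list(itertools.product([1, 2], [50, …, 140]))
def pvTableC : List (Int × Int) :=
  ([1, 2] : List Int).flatMap (fun a =>
    ([50, 60, 70, 80, 90, 100, 110, 120, 130, 140] : List Int).map (fun b => (a, b)))

-- the for-loop building newc by appending list(i)
def pvNewc : List (List Int) :=
  pvTableC.foldl (fun acc i => acc ++ [[i.1, i.2]]) []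

def actioninNN (ac : List Int) : List Int :=
  ((PySem.List.pyGet? pvNewc ((pvSearchA ac 1 0 : Nat) : Int)).getD [])   -- newc[index]; none (IndexError) excluded by Pre_

-- ===== PORT B =====
-- the for-loop computing the index of the first 1 (len(ac) when absent)
def pvAltIndex (ac : List Int) : Int :=
  match ac with
  | [] => 0
  | v :: rest => if v = 1 then 0 else 1 + pvAltIndex rest

def actioninNN_alt (ac : List Int) : List Int :=
  let index := pvAltIndex ac
  if 20 ≤ index then []   -- the explicit 'raise IndexError' in Source B; excluded by Pre_
  else [1 + PySem.Int.floordiv index 10, 50 + 10 * PySem.Int.mod index 10]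

-- ===== PRECONDITION & SPEC =====
-- Pre_ excludes exactly the inputs on which both programs raise IndexError: those whose first 1 sits at position ≥ 20
-- (equivalently: no 1 among the first 20 elements while the list reaches length 20 or contains a later 1).
def Pre_actioninNN (ac : List Int) : Prop :=
  (1 : Int) ∈ ac.take 20 ∨ ((1 : Int) ∉ ac ∧ ac.length < 20)
instance (ac : List Int) : Decidable (Pre_actioninNN ac) := by unfold Pre_actioninNN; infer_instance
def pvWitness_actioninNN : List Int := [0, 1, 2]

def Spec_actioninNN (ac : List Int) (out : List Int) : Prop := out = actioninNN_alt ac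
instance (ac : List Int) (out : List Int) : Decidable (Spec_actioninNN ac out) := by unfold Spec_actioninNN; infer_instance

-- ===== CLAIM (what is proved, stated in full; the proofs are below) =====
def Claim_equal_actioninNN : Prop := ∀ (ac : List Int), Dom_actioninNN ac → Pre_actioninNN ac → Spec_actioninNN ac (actioninNN ac)

-- ===== LEMMAS AND PROOFS =====
lemma pvSearchA_shift (ac : List Int) (item : Int) (p : Nat) :
    pvSearchA ac item p = p + pvSearchA ac item 0 := by
  induction ac generalizing p with
  | nil => simp [pvSearchA]
  | cons x rest ih =>
    by_cases h : x = item
    · simp [pvSearchA, h]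
    · simp only [pvSearchA, if_neg h]
      rw [ih (p + 1), ih 1]; omega

lemma pvAltIndex_eq (ac : List Int) : pvAltIndex ac = (pvSearchA ac 1 0 : Int) := by
  induction ac with
  | nil => simp [pvAltIndex, pvSearchA]
  | cons x rest ih =>
    by_cases h : x = 1
    · simp [pvAltIndex, pvSearchA, h]
    · simp only [pvAltIndex, pvSearchA, if_neg h]
      rw [pvSearchA_shift rest 1 1, ih]; push_cast; ring

lemma pvSearchA_mem_take (ac : List Int) (n : Nat) (h : (1 : Int) ∈ ac.take n) :
    pvSearchA ac 1 0 < n := by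
  induction ac generalizing n with
  | nil => simp at h
  | cons x rest ih =>
    cases n with
    | zero => simp at h
    | succ m =>
      by_cases hx : x = 1
      · simp [pvSearchA, hx]
      · simp only [List.take_succ_cons, List.mem_cons] at h
        rcases h with h | h
        · exact absurd h.symm hx
        · simp only [pvSearchA, if_neg hx]
          rw [pvSearchA_shift rest 1 1]
          have := ih m h; omega

lemma pvSearchA_not_mem (ac : List Int) (h : (1 : Int) ∉ ac) :
    pvSearchA ac 1 0 = ac.length := by
  induction ac with
  | nil => simp [pvSearchA]
  | cons x rest ih =>
    simp only [List.mem_cons, not_or] at h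
    have hx1 : x ≠ 1 := fun hx => h.1 hx.symm
    simp only [pvSearchA, if_neg hx1]
    rw [pvSearchA_shift rest 1 1, ih h.2]
    simp [List.length_cons]; omega

lemma table_lookup (i : Nat) (hi : i < 20) :
    ((PySem.List.pyGet? pvNewc (i : Int)).getD []) =
      [1 + PySem.Int.floordiv (i : Int) 10, 50 + 10 * PySem.Int.mod (i : Int) 10] := by
  interval_cases i <;> decide

-- ===== VERDICT (by name: the statement is the Claim_ definition above) =====
theorem actioninNN_spec : Claim_equal_actioninNN := by
  intro ac _ hpre
  unfold Spec_actioninNN actioninNN actioninNN_alt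
  have hlt : pvSearchA ac 1 0 < 20 := by
    rcases hpre with h | ⟨h1, h2⟩
    · exact pvSearchA_mem_take ac 20 h
    · rw [pvSearchA_not_mem ac h1]; exact h2
  rw [pvAltIndex_eq ac]
  rw [if_neg (by exact_mod_cast Nat.not_le.mpr hlt)]
  exact table_lookup (pvSearchA ac 1 0) hlt
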